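-- pv_equiv track=rewrite | github.com/llankar/GMCampaignDesigner | modules/helpers/update_helper.py | _select_asset
-- ===== SOURCE A (Python) =====
-- from typing import Callable, Optional, Sequence
--
-- def _select_asset(assets: Sequence[dict], preferred_asset: Optional[str]) -> Optional[dict]:
--     if not assets:
--         return None
--     if preferred_asset:
--         for asset in assets:
--             if asset.get("name") == preferred_asset:
--                 return asset
--     for asset in assets:
--         name = (asset.get("name") or "").lower()
--         if name.endswith(('.zip', '.tar.gz', '.tar.xz')):
--             return asset
--     return assets[0]
-- ===== SOURCE B (Python) =====
-- def _select_asset(assets, preferred_asset):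
--     if not assets:
--         return None
--     name_match = None
--     arch_match = None
--     for asset in assets:
--         if preferred_asset and name_match is None and asset.get("name") == preferred_asset:
--             name_match = asset
--         if arch_match is None and (asset.get("name") or "").lower().endswith(('.zip', '.tar.gz', '.tar.xz')):
--             arch_match = asset
--     if name_match is not None:
--         return name_match
--     if arch_match is not None:
--         return arch_match
--     return assets[0]
-- ===== Notes on version B (the rewrite author's own statement) =====
-- stated objective: alternative
-- what changed: A's two sequential early-return scans are replaced by one pass that records the first preferred-name match and the first archive-extension match in two accumulators, resolving priority after the loop.
import Mathlib
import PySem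

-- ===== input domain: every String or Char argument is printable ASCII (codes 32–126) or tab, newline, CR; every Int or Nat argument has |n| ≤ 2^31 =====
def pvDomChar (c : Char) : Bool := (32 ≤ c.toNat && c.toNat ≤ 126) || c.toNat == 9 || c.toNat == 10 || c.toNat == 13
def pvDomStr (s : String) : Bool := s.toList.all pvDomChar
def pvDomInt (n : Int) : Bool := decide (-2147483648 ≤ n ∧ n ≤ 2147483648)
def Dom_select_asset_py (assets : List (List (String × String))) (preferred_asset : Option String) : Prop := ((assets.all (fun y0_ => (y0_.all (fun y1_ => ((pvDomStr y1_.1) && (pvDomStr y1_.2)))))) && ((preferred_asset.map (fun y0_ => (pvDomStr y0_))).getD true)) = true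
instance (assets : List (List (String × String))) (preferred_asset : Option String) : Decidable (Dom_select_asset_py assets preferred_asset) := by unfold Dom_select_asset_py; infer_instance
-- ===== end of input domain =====

-- B replaces A's two sequential early-return scans by a single pass with two accumulators
-- (first preferred-name match, first archive match) resolved after the loop; same cost, different decomposition.

-- ===== PORT A =====
-- first loop of A: first asset whose "name" equals the preferred string
def findPreferredA (p : String) : List (List (String × String)) → Option (List (String × String))
  | [] => none
  | a :: rest =>
    if PySem.Dict.get? (PySem.Dict.mk a) "name" = some p then some a else findPreferredA p rest

-- second loop of A: first asset whose lowercased name ends with an archive extension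
def findArchiveA : List (List (String × String)) → Option (List (String × String))
  | [] => none
  | a :: rest =>
    let name := PySem.Str.lower ((PySem.Dict.get? (PySem.Dict.mk a) "name").getD "")
    if PySem.Str.endswith name ".zip" || PySem.Str.endswith name ".tar.gz" || PySem.Str.endswith name ".tar.xz"
    then some a else findArchiveA rest

def select_asset_py (assets : List (List (String × String))) (preferred_asset : Option String) : Option (List (String × String)) :=
  if assets = [] then none
  else
    let fromPref : Option (List (String × String)) :=
      match preferred_asset with
      | some p => if p = "" then none else findPreferredA p assets  -- `if preferred_asset:` truthiness
      | none => none
    match fromPref with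
    | some a => some a
    | none =>
      match findArchiveA assets with
      | some a => some a
      | none => PySem.List.pyGet? assets 0   -- assets[0]; assets nonempty here

-- ===== PORT B =====
-- single pass carrying (first name match, first archive match)
def altScan (preferred_asset : Option String) :
    List (List (String × String)) → Option (List (String × String)) → Option (List (String × String)) →
    Option (List (String × String)) × Option (List (String × String))
  | [], nm, am => (nm, am)
  | a :: rest, nm, am =>
    let nm' :=
      match preferred_asset with
      | some p =>
        if p ≠ "" ∧ nm = none ∧ PySem.Dict.get? (PySem.Dict.mk a) "name" = some p then some a else nm
      | none => nm
    let am' :=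
      if am = none ∧
         (let name := PySem.Str.lower ((PySem.Dict.get? (PySem.Dict.mk a) "name").getD "")
          PySem.Str.endswith name ".zip" || PySem.Str.endswith name ".tar.gz" || PySem.Str.endswith name ".tar.xz") = true
      then some a else am
    altScan preferred_asset rest nm' am'

def select_asset_py_alt (assets : List (List (String × String))) (preferred_asset : Option String) : Option (List (String × String)) :=
  if assets = [] then none
  else
    match altScan preferred_asset assets none none with
    | (some a, _) => some a
    | (none, some a) => some a
    | (none, none) => PySem.List.pyGet? assets 0

-- ===== PRECONDITION & SPEC =====
def Spec_select_asset_py (assets : List (List (String × String))) (preferred_asset : Option String) (out : Option (List (String × String))) : Prop := out = select_asset_py_alt assets preferred_asset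
instance (assets : List (List (String × String))) (preferred_asset : Option String) (out : Option (List (String × String))) : Decidable (Spec_select_asset_py assets preferred_asset out) := by unfold Spec_select_asset_py; infer_instance

-- ===== CLAIM (what is proved, stated in full; the proofs are below) =====
def Claim_equal_select_asset_py : Prop := ∀ (assets : List (List (String × String))) (preferred_asset : Option String), Dom_select_asset_py assets preferred_asset → Spec_select_asset_py assets preferred_asset (select_asset_py assets preferred_asset)

-- ===== LEMMAS AND PROOFS =====

-- what A's first phase computes, as a function of the truthy preferred string
def prefResult (preferred_asset : Option String) (assets : List (List (String × String))) :
    Option (List (String × String)) :=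
  match preferred_asset with
  | some p => if p = "" then none else findPreferredA p assets
  | none => none

theorem altScan_eq (preferred_asset : Option String) :
    ∀ (xs : List (List (String × String))) (nm am : Option (List (String × String))),
      altScan preferred_asset xs nm am =
        (nm.or (prefResult preferred_asset xs), am.or (findArchiveA xs)) := by
  intro xs
  induction xs with
  | nil => intro nm am; simp [altScan, prefResult, findArchiveA]; cases preferred_asset <;> simp [findPreferredA]
  | cons a rest ih =>
    intro nm am
    rw [altScan.eq_def]
    simp only []
    rw [ih]
    cases preferred_asset with
    | none =>
      simp only [prefResult]
      cases am <;> simp [findArchiveA] <;> split_ifs <;> simp_all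
    | some p =>
      simp only [prefResult]
      by_cases hp : p = ""
      · simp [hp]
        cases nm <;> cases am <;> simp [findArchiveA] <;> split_ifs <;> simp_all
      · simp [hp, findPreferredA]
        cases nm <;> cases am <;> simp [findArchiveA] <;> split_ifs <;> simp_all

theorem select_asset_py_eq_alt (assets : List (List (String × String))) (preferred_asset : Option String) :
    select_asset_py assets preferred_asset = select_asset_py_alt assets preferred_asset := by
  unfold select_asset_py select_asset_py_alt
  by_cases h : assets = []
  · simp [h]
  · simp only [h]
    rw [altScan_eq]
    simp only [Option.or]
    cases hP : prefResult preferred_asset assets <;>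
      cases hA : findArchiveA assets <;>
      simp [prefResult] at hP ⊢ <;>
      cases preferred_asset <;> simp_all [prefResult]

-- ===== VERDICT (by name: the statement is the Claim_ definition above) =====
theorem select_asset_py_spec : Claim_equal_select_asset_py := by
  intro assets preferred_asset _
  unfold Spec_select_asset_py
  exact select_asset_py_eq_alt assets preferred_asset
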